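-- pv_equiv track=rewrite | github.com/alexkie007/offer | others/thoughtworks.py | process
-- ===== SOURCE A (Python) =====
-- def process(text, width):
--     code, msg = check_params(text, width)
--     if code == 400:
--         return msg
--     size = len(text)
--     line = 1
--     result = []
--     string = ""
--     line_count = 0
--     for index, value in enumerate(text):
--         if index > 0 and index % width == 0:
--             if (text[index].isalpha() and text[index - 1].isalpha()) or text[index - 1] == text[index] == " ":
--                 line_count += 1
--             line += 1
--         if 0 < index < size:
--             # 如果当前索引对应的字符与前一个字符不是相同类型，则说明前面的字符串已经是一节，因此考虑增加到输出
--             if (text[index].isalpha() and text[index - 1] == " ") or (text[index] == " " and text[index - 1].isalpha()):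
--                 # 需要考虑当前索引是否进行了换行，如果换行了需要将行号减1
--                 if index % width == 0:
--                     lines = [str(x) for x in range(line - 1 - line_count, line)]
--                 else:
--                     lines = [str(x) for x in range(line - line_count, line + 1)]
--                 result.append(string + "(" + ",".join(lines) + ")")
--                 line_count = 0
--                 string = ""
--         string += value
--         if index == size - 1:
--             lines = [str(x) for x in range(line - line_count, line + 1)]
--             result.append(string + "(" + ",".join(lines) + ")")
--     return ";".join(result) + ";"
--
-- def check_params(text, width):
--     code = 200
--     msg = ""
--     if width < 10 or width > 80:
--         code = 400
--         msg = "ERROR: Width out of range!"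
--     for s in text:
--         if s.isalpha() or s == " ":
--             continue
--         code = 400
--         msg = "ERROR: Invalid character detected!"
--     return code, msg
-- ===== SOURCE B (Python) =====
-- def process(text, width):
--     # validity checks: invalid character wins over width (matching check_params's
--     # last-assignment-wins order)
--     if any(not (c.isalpha() or c == " ") for c in text):
--         return "ERROR: Invalid character detected!"
--     if width < 10 or width > 80:
--         return "ERROR: Width out of range!"
--     out = []
--     i, n = 0, len(text)
--     while i < n:
--         j = i + 1
--         while j < n and text[j].isalpha() == text[i].isalpha():
--             j += 1
--         lines = ",".join(str(L) for L in range(i // width + 1, (j - 1) // width + 2))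
--         out.append(text[i:j] + "(" + lines + ")")
--         i = j
--     return ";".join(out) + ";"
-- ===== Notes on version B (the rewrite author's own statement) =====
-- stated objective: simpler
-- what changed: B replaces A's stateful char-by-char scan (line/line_count/string accumulators with wrap and boundary cases) by splitting the text into maximal alpha/space runs and computing each run's line range in closed form from its start/end indices (start//width+1 .. end//width+1).
import Mathlib
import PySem

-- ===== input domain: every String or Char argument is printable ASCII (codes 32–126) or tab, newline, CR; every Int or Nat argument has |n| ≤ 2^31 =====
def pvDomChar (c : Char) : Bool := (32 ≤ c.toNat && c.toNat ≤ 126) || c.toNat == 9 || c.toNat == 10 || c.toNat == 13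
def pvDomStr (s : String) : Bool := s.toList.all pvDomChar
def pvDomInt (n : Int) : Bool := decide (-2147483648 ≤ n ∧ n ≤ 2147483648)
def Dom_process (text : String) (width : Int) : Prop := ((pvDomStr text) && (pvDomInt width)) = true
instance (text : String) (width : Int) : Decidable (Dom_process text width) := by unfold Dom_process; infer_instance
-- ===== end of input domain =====

-- B is simpler: it splits the text into maximal alpha/space runs and computes each
-- run's line range in closed form, instead of A's stateful line/line_count scan.

-- ===== PORT A =====
def check_params (text : String) (width : Int) : Int × String :=
  let st : Int × String :=
    if width < 10 || width > 80 then (400, "ERROR: Width out of range!") else (200, "")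
  text.toList.foldl
    (fun st s =>
      if PySem.Chars.isalpha s || s == ' ' then st
      else (400, "ERROR: Invalid character detected!"))
    st

structure StA where
  line : Int
  result : List (List Char)
  string : List Char
  lineCount : Int
deriving Repr, DecidableEq

def stepA (cs : List Char) (size width : Int) (st : StA) (iv : Int × Char) : StA :=
  let index := iv.1
  let value := iv.2
  let st :=
    if index > 0 && PySem.Int.mod index width == 0 then
      let lc :=
        if (PySem.Chars.isalpha (PySem.List.pyGetD cs index ' ') &&
              PySem.Chars.isalpha (PySem.List.pyGetD cs (index - 1) ' ')) ||
           (PySem.List.pyGetD cs (index - 1) ' ' == PySem.List.pyGetD cs index ' ' &&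
              PySem.List.pyGetD cs index ' ' == ' ')
        then st.lineCount + 1 else st.lineCount
      { st with lineCount := lc, line := st.line + 1 }
    else st
  let st :=
    if 0 < index && index < size then
      if (PySem.Chars.isalpha (PySem.List.pyGetD cs index ' ') &&
            PySem.List.pyGetD cs (index - 1) ' ' == ' ') ||
         (PySem.List.pyGetD cs index ' ' == ' ' &&
            PySem.Chars.isalpha (PySem.List.pyGetD cs (index - 1) ' ')) then
        let lines :=
          if PySem.Int.mod index width == 0 then
            (PySem.List.pyRange (st.line - 1 - st.lineCount) st.line 1).map PySem.Int.toChars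
          else
            (PySem.List.pyRange (st.line - st.lineCount) (st.line + 1) 1).map PySem.Int.toChars
        { st with
            result := st.result ++ [st.string ++ '(' :: PySem.Chars.join [','] lines ++ [')']],
            lineCount := 0, string := [] }
      else st
    else st
  let st := { st with string := st.string ++ [value] }
  if index == size - 1 then
    let lines := (PySem.List.pyRange (st.line - st.lineCount) (st.line + 1) 1).map PySem.Int.toChars
    { st with result := st.result ++ [st.string ++ '(' :: PySem.Chars.join [','] lines ++ [')']] }
  else st

def process (text : String) (width : Int) : String :=
  let cm := check_params text width
  if cm.1 == 400 then cm.2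
  else
    let cs := text.toList
    let size : Int := cs.length
    let fin := (PySem.List.enumerate cs 0).foldl (stepA cs size width) ⟨1, [], [], 0⟩
    String.ofList (PySem.Chars.join [';'] fin.result ++ [';'])

-- ===== PORT B =====
def pieceB (width i j : Int) (run : List Char) : List Char :=
  run ++ '(' ::
    PySem.Chars.join [',']
      ((PySem.List.pyRange (PySem.Int.floordiv i width + 1)
          (PySem.Int.floordiv (j - 1) width + 2) 1).map PySem.Int.toChars)
    ++ [')']

def segsB (width : Int) (i : Int) : List Char → List (List Char)
  | [] => []
  | c :: rest =>
    let run := c :: rest.takeWhile (fun d => PySem.Chars.isalpha d == PySem.Chars.isalpha c)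
    pieceB width i (i + run.length) run ::
      segsB width (i + run.length)
        (rest.dropWhile (fun d => PySem.Chars.isalpha d == PySem.Chars.isalpha c))
termination_by l => l.length
decreasing_by
  simp only [List.length_cons]
  exact Nat.lt_succ_of_le (List.length_dropWhile_le _ _)

def process_alt (text : String) (width : Int) : String :=
  if text.toList.any (fun c => !(PySem.Chars.isalpha c || c == ' ')) then
    "ERROR: Invalid character detected!"
  else if width < 10 || width > 80 then
    "ERROR: Width out of range!"
  else
    String.ofList (PySem.Chars.join [';'] (segsB width 0 text.toList) ++ [';'])

-- ===== PRECONDITION & SPEC =====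
def Spec_process (text : String) (width : Int) (out : String) : Prop := out = process_alt text width
instance (text : String) (width : Int) (out : String) : Decidable (Spec_process text width out) := by unfold Spec_process; infer_instance

-- ===== CLAIM (what is proved, stated in full; the proofs are below) =====
def Claim_equal_process : Prop := ∀ (text : String) (width : Int), Dom_process text width → Spec_process text width (process text width)

-- ===== LEMMAS AND PROOFS =====

-- shorthand used only by the proofs
def pvValid (c : Char) : Bool := PySem.Chars.isalpha c || c == ' '

-- the common shape of an emitted piece
def emitPiece (s : List Char) (lo hi : Int) : List Char :=
  s ++ '(' :: PySem.Chars.join [','] ((PySem.List.pyRange lo hi 1).map PySem.Int.toChars) ++ [')']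

lemma pieceB_eq (w i j : Int) (run : List Char) :
    pieceB w i j run
      = emitPiece run (PySem.Int.floordiv i w + 1) (PySem.Int.floordiv (j - 1) w + 2) := rfl

lemma alpha_ne_space (x : Char) (h : PySem.Chars.isalpha x = true) : (x == ' ') = false := by
  cases hbe : x == ' '
  · rfl
  · exfalso
    have hx : x = ' ' := by simpa using hbe
    subst hx
    exact absurd h (by decide)

lemma changeTest_eq (c d : Char) (hc : pvValid c = true) (hd : pvValid d = true) :
    ((PySem.Chars.isalpha c && (d == ' ')) || ((c == ' ') && PySem.Chars.isalpha d))
      = !(PySem.Chars.isalpha c == PySem.Chars.isalpha d) := by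
  unfold pvValid at hc hd
  by_cases h1 : PySem.Chars.isalpha c = true
  · by_cases h2 : PySem.Chars.isalpha d = true
    · simp [h1, h2, alpha_ne_space c h1, alpha_ne_space d h2]
    · have hd' : d = ' ' := by simp [h2] at hd; simpa using hd
      subst hd'
      simp [h1, show PySem.Chars.isalpha ' ' = false from by decide]
  · have hc' : c = ' ' := by simp [h1] at hc; simpa using hc
    subst hc'
    by_cases h2 : PySem.Chars.isalpha d = true
    · simp [h2, alpha_ne_space d h2, show PySem.Chars.isalpha ' ' = false from by decide]
    · have hd' : d = ' ' := by simp [h2] at hd; simpa using hd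
      subst hd'
      decide

lemma sameTest_eq (c d : Char) (hc : pvValid c = true) (hd : pvValid d = true) :
    ((PySem.Chars.isalpha c && PySem.Chars.isalpha d) || ((d == c) && (c == ' ')))
      = (PySem.Chars.isalpha c == PySem.Chars.isalpha d) := by
  unfold pvValid at hc hd
  by_cases h1 : PySem.Chars.isalpha c = true
  · by_cases h2 : PySem.Chars.isalpha d = true
    · simp [h1, h2]
    · have hd' : d = ' ' := by simp [h2] at hd; simpa using hd
      subst hd'
      simp [h1, alpha_ne_space c h1, show PySem.Chars.isalpha ' ' = false from by decide]
  · have hc' : c = ' ' := by simp [h1] at hc; simpa using hc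
    subst hc'
    by_cases h2 : PySem.Chars.isalpha d = true
    · simp [h2, alpha_ne_space d h2, show PySem.Chars.isalpha ' ' = false from by decide]
    · have hd' : d = ' ' := by simp [h2] at hd; simpa using hd
      subst hd'
      decide

lemma fd_zero (w : Int) (hw : 0 < w) : PySem.Int.floordiv 0 w = 0 := by
  rw [PySem.Int.floordiv_eq_ediv_of_pos hw]
  exact Int.zero_ediv w

lemma fd_succ (w k : Int) (hw : 0 < w) (hk : 0 ≤ k) :
    PySem.Int.floordiv (k + 1) w
      = PySem.Int.floordiv k w + (if PySem.Int.mod (k + 1) w = 0 then 1 else 0) := by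
  rw [PySem.Int.floordiv_eq_ediv_of_pos hw, PySem.Int.floordiv_eq_ediv_of_pos hw,
      PySem.Int.mod_eq_emod_of_pos hw]
  have h0 : w * (k / w) + k % w = k := Int.ediv_add_emod k w
  have hr0 : 0 ≤ k % w := Int.emod_nonneg k (by omega)
  have hr1 : k % w < w := Int.emod_lt_of_pos k hw
  by_cases hc : k % w + 1 = w
  · have hk1 : k + 1 = w * (k / w + 1) := by
      have : k + 1 = w * (k / w) + (k % w + 1) := by omega
      rw [this, hc]; ring
    rw [hk1, Int.mul_ediv_cancel_left _ (by omega : w ≠ 0), Int.mul_emod_right]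
    simp
  · have hk1 : k + 1 = (k % w + 1) + w * (k / w) := by omega
    rw [hk1, Int.add_mul_ediv_left _ _ (by omega : w ≠ 0),
        Int.ediv_eq_zero_of_lt (by omega) (by omega)]
    have h2 : ((k % w + 1) + w * (k / w)) % w = (k % w + 1) % w :=
      Int.add_mul_emod_self_left (k % w + 1) w (k / w)
    rw [h2, Int.emod_eq_of_lt (by omega) (by omega)]
    rw [if_neg (by omega)]
    omega

lemma fd_succ_eq (w k : Int) (hw : 0 < w) (hk : 0 ≤ k) (h : PySem.Int.mod (k + 1) w = 0) :
    PySem.Int.floordiv (k + 1) w = PySem.Int.floordiv k w + 1 := by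
  rw [fd_succ w k hw hk, if_pos h]

lemma fd_succ_ne (w k : Int) (hw : 0 < w) (hk : 0 ≤ k) (h : ¬ PySem.Int.mod (k + 1) w = 0) :
    PySem.Int.floordiv (k + 1) w = PySem.Int.floordiv k w := by
  rw [fd_succ w k hw hk, if_neg h]
  omega

lemma pyGetD_drop (cs pre post : List Char) (d : Char) (s : Nat)
    (h : List.drop s cs = pre ++ d :: post) :
    PySem.List.pyGetD cs ((s + pre.length : Nat) : Int) ' ' = d := by
  rw [PySem.List.pyGetD_natCast]
  have h1 : cs[s + pre.length]? = some d := by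
    rw [← List.getElem?_drop, h, List.getElem?_append_right (Nat.le_refl _)]
    simp
  simp [List.getD_eq_getElem?_getD, h1]

lemma cp_fold (l : List Char) (init : Int × String) :
    l.foldl (fun st s => if PySem.Chars.isalpha s || s == ' ' then st
                         else (400, "ERROR: Invalid character detected!")) init
      = if l.any (fun c => !(PySem.Chars.isalpha c || c == ' ')) then
          ((400 : Int), "ERROR: Invalid character detected!") else init := by
  induction l generalizing init with
  | nil => simp
  | cons c l ih =>
    simp only [List.foldl_cons, List.any_cons]
    by_cases hc : (PySem.Chars.isalpha c || c == ' ') = true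
    · rw [if_pos hc, ih]
      simp [hc]
    · rw [if_neg hc, ih]
      simp only [Bool.not_eq_true] at hc
      simp [hc]

lemma fd_congr (w a b : Int) (h : a = b) :
    PySem.Int.floordiv a w = PySem.Int.floordiv b w := by rw [h]

lemma emitPiece_congr (s : List Char) {lo1 hi1 lo2 hi2 : Int} (h1 : lo1 = lo2) (h2 : hi1 = hi2) :
    emitPiece s lo1 hi1 = emitPiece s lo2 hi2 := by rw [h1, h2]

lemma pieceB_run_congr (w i : Int) (j1 j2 : Int) (s1 s2 : List Char)
    (hj : j1 = j2) (hs : s1 = s2) : pieceB w i j1 s1 = pieceB w i j2 s2 := by rw [hj, hs]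

lemma stA_congr (l1 l2 lc1 lc2 : Int) (R1 R2 : List (List Char)) (s1 s2 : List Char)
    (h1 : l1 = l2) (h2 : R1 = R2) (h3 : s1 = s2) (h4 : lc1 = lc2) :
    (⟨l1, R1, s1, lc1⟩ : StA) = ⟨l2, R2, s2, lc2⟩ := by rw [h1, h2, h3, h4]

-- evaluation of one A-step at an index whose character has the same class as its predecessor
lemma stepA_same (cs : List Char) (size w : Int) (st : StA) (k : Int) (d e : Char)
    (hk : k > 0) (hklt : k < size)
    (hcur : PySem.List.pyGetD cs k ' ' = d) (hprev : PySem.List.pyGetD cs (k - 1) ' ' = e)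
    (hvd : pvValid d = true) (hve : pvValid e = true)
    (hsame : PySem.Chars.isalpha d = PySem.Chars.isalpha e) :
    stepA cs size w st (k, d)
      = (let st1 := if PySem.Int.mod k w = 0 then
                      { st with line := st.line + 1, lineCount := st.lineCount + 1 } else st
         let st2 := { st1 with string := st1.string ++ [d] }
         if k = size - 1 then
           { st2 with result := st2.result ++
               [emitPiece st2.string (st2.line - st2.lineCount) (st2.line + 1)] }
         else st2) := by
  have hk2 : 0 < k := hk
  by_cases hend : k = size - 1
  · subst hend
    have h1 : 1 < size := by omega
    unfold stepA
    dsimp only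
    rw [hcur, hprev, sameTest_eq d e hvd hve, changeTest_eq d e hvd hve, hsame]
    by_cases hmod : PySem.Int.mod (size - 1) w = 0 <;>
      simp [hmod, hk, hk2, hklt, h1, emitPiece, List.append_assoc]
  · unfold stepA
    dsimp only
    rw [hcur, hprev, sameTest_eq d e hvd hve, changeTest_eq d e hvd hve, hsame]
    by_cases hmod : PySem.Int.mod k w = 0 <;>
      simp [hmod, hend, hk, hk2, hklt, emitPiece, List.append_assoc]

-- evaluation of one A-step at an index whose character changes class (a run boundary)
lemma stepA_diff (cs : List Char) (size w : Int) (st : StA) (k : Int) (d e : Char)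
    (hk : k > 0) (hklt : k < size)
    (hcur : PySem.List.pyGetD cs k ' ' = d) (hprev : PySem.List.pyGetD cs (k - 1) ' ' = e)
    (hvd : pvValid d = true) (hve : pvValid e = true)
    (hdiff : PySem.Chars.isalpha d = !(PySem.Chars.isalpha e)) :
    stepA cs size w st (k, d)
      = (let st1 : StA :=
           ⟨(if PySem.Int.mod k w = 0 then st.line + 1 else st.line),
            st.result ++ [emitPiece st.string (st.line - st.lineCount) (st.line + 1)],
            [d], 0⟩
         if k = size - 1 then
           { st1 with result := st1.result ++ [emitPiece [d] st1.line (st1.line + 1)] }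
         else st1) := by
  have hk2 : 0 < k := hk
  by_cases hend : k = size - 1
  · subst hend
    have h1 : 1 < size := by omega
    unfold stepA
    dsimp only
    rw [hcur, hprev, sameTest_eq d e hvd hve, changeTest_eq d e hvd hve, hdiff]
    by_cases hmod : PySem.Int.mod (size - 1) w = 0 <;>
      cases he : PySem.Chars.isalpha e <;>
        simp [hmod, hk, hk2, hklt, h1, emitPiece, List.append_assoc]
  · unfold stepA
    dsimp only
    rw [hcur, hprev, sameTest_eq d e hvd hve, changeTest_eq d e hvd hve, hdiff]
    by_cases hmod : PySem.Int.mod k w = 0 <;>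
      cases he : PySem.Chars.isalpha e <;>
        simp [hmod, hend, hk, hk2, hklt, emitPiece, List.append_assoc]

-- folding A's step through the remainder of a run
lemma innerLem (cs : List Char) (w : Int) (hw : 0 < w)
    (hv : ∀ c ∈ cs, pvValid c = true) :
    ∀ (tl : List Char) (rstart k : Nat) (run rest2 : List Char) (R : List (List Char)) (b : Bool),
      List.drop rstart cs = run ++ tl ++ rest2 →
      run ≠ [] →
      k = rstart + run.length →
      (∀ x ∈ run ++ tl, PySem.Chars.isalpha x = b) →
      (PySem.List.enumerate tl (k : Int)).foldl (stepA cs (cs.length : Int) w)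
          ⟨PySem.Int.floordiv ((k : Int) - 1) w + 1, R, run,
           PySem.Int.floordiv ((k : Int) - 1) w - PySem.Int.floordiv (rstart : Int) w⟩
        = ⟨PySem.Int.floordiv ((k : Int) + tl.length - 1) w + 1,
           R ++ (if rest2 = [] ∧ tl ≠ [] then
                   [pieceB w (rstart : Int) ((k : Int) + tl.length) (run ++ tl)] else []),
           run ++ tl,
           PySem.Int.floordiv ((k : Int) + tl.length - 1) w
             - PySem.Int.floordiv (rstart : Int) w⟩ := by
  intro tl
  induction tl with
  | nil =>
    intro rstart k run rest2 R b hdrop hne hk hcl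
    simp [PySem.List.enumerate_nil]
  | cons d tl' ih =>
    intro rstart k run rest2 R b hdrop hne hk hcl
    subst hk
    have hr1 : 0 < run.length := by
      cases run with
      | nil => exact absurd rfl hne
      | cons a l => simp
    have hlen := congrArg List.length hdrop
    simp [List.length_drop] at hlen
    have hdrop' : List.drop rstart cs = run ++ d :: (tl' ++ rest2) := by simpa using hdrop
    have hcur := pyGetD_drop cs run (tl' ++ rest2) d rstart hdrop'
    have hgl : run.dropLast ++ run.getLast hne :: (d :: (tl' ++ rest2))
        = run ++ d :: (tl' ++ rest2) := by
      conv_rhs => rw [← List.dropLast_concat_getLast hne]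
      simp
    have hdropP : List.drop rstart cs
        = run.dropLast ++ run.getLast hne :: (d :: (tl' ++ rest2)) := by
      rw [hdrop', ← hgl]
    have hprev := pyGetD_drop cs run.dropLast (d :: (tl' ++ rest2)) (run.getLast hne) rstart hdropP
    have hidx : ((rstart + run.dropLast.length : Nat) : Int)
        = ((rstart + run.length : Nat) : Int) - 1 := by
      rw [List.length_dropLast]; omega
    rw [hidx] at hprev
    have hsub : ∀ x ∈ run ++ d :: (tl' ++ rest2), x ∈ cs := by
      intro x hx
      rw [← hdrop'] at hx
      exact (List.drop_suffix rstart cs).subset hx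
    have hvd : pvValid d = true := hv d (hsub d (by simp))
    have hvlast : pvValid (run.getLast hne) = true :=
      hv _ (hsub _ (List.mem_append_left _ (List.getLast_mem hne)))
    have hbd : PySem.Chars.isalpha d = b := hcl d (by simp)
    have hblast : PySem.Chars.isalpha (run.getLast hne) = b :=
      hcl _ (List.mem_append_left _ (List.getLast_mem hne))
    have hsame : PySem.Chars.isalpha d = PySem.Chars.isalpha (run.getLast hne) := by
      rw [hbd, hblast]
    set K : Int := ((rstart + run.length : Nat) : Int) with hK
    have hK0 : K > 0 := by omega
    have hKlt : K < (cs.length : Int) := by omega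
    have harg : stepA cs (cs.length : Int) w
          ⟨PySem.Int.floordiv (K - 1) w + 1, R, run,
           PySem.Int.floordiv (K - 1) w - PySem.Int.floordiv (rstart : Int) w⟩ (K, d)
        = ⟨PySem.Int.floordiv K w + 1,
           R ++ (if rest2 = [] ∧ tl' = []
                 then [pieceB w (rstart : Int) (K + 1) (run ++ [d])] else []),
           run ++ [d],
           PySem.Int.floordiv K w - PySem.Int.floordiv (rstart : Int) w⟩ := by
      rw [stepA_same cs (cs.length : Int) w _ K d (run.getLast hne) hK0 hKlt hcur hprev hvd
            hvlast hsame]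
      dsimp only
      by_cases hmod : PySem.Int.mod K w = 0
      · have hfd1 : PySem.Int.floordiv K w = PySem.Int.floordiv (K - 1) w + 1 := by
          have h := fd_succ_eq w (K - 1) hw (by omega) (by simpa using hmod)
          simpa using h
        rw [if_pos hmod]
        dsimp only
        by_cases hend : K = (cs.length : Int) - 1
        · have hl0 : tl'.length + rest2.length = 0 := by omega
          have h1 : tl' = [] := by cases tl' with | nil => rfl | cons a l => simp at hl0
          have h2 : rest2 = [] := by cases rest2 with | nil => rfl | cons a l => simp at hl0
          rw [if_pos hend, if_pos (⟨h2, h1⟩ : rest2 = [] ∧ tl' = [])]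
          refine stA_congr _ _ _ _ _ _ _ _ (by omega) ?_ rfl (by omega)
          simp only [pieceB_eq, add_sub_cancel_right]
          exact congrArg (fun x => R ++ [x]) (emitPiece_congr _ (by omega) (by omega))
        · have hne2 : ¬ (rest2 = [] ∧ tl' = []) := by
            rintro ⟨h2, h1⟩
            subst h1; subst h2
            simp at hlen
            omega
          rw [if_neg hend, if_neg hne2]
          exact stA_congr _ _ _ _ _ _ _ _ (by omega) (by simp) rfl (by omega)
      · have hfd1 : PySem.Int.floordiv K w = PySem.Int.floordiv (K - 1) w := by
          have h := fd_succ_ne w (K - 1) hw (by omega) (by simpa using hmod)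
          simpa using h
        rw [if_neg hmod]
        dsimp only
        by_cases hend : K = (cs.length : Int) - 1
        · have hl0 : tl'.length + rest2.length = 0 := by omega
          have h1 : tl' = [] := by cases tl' with | nil => rfl | cons a l => simp at hl0
          have h2 : rest2 = [] := by cases rest2 with | nil => rfl | cons a l => simp at hl0
          rw [if_pos hend, if_pos (⟨h2, h1⟩ : rest2 = [] ∧ tl' = [])]
          refine stA_congr _ _ _ _ _ _ _ _ (by omega) ?_ rfl (by omega)
          simp only [pieceB_eq, add_sub_cancel_right]
          exact congrArg (fun x => R ++ [x]) (emitPiece_congr _ (by omega) (by omega))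
        · have hne2 : ¬ (rest2 = [] ∧ tl' = []) := by
            rintro ⟨h2, h1⟩
            subst h1; subst h2
            simp at hlen
            omega
          rw [if_neg hend, if_neg hne2]
          exact stA_congr _ _ _ _ _ _ _ _ (by omega) (by simp) rfl (by omega)
    rw [PySem.List.enumerate_cons, List.foldl_cons, harg]
    have hc1 : ((rstart + (run ++ [d]).length : Nat) : Int) = K + 1 := by
      simp
      omega
    have ih' := ih rstart (rstart + (run ++ [d]).length) (run ++ [d]) rest2
        (R ++ (if rest2 = [] ∧ tl' = []
               then [pieceB w (rstart : Int) (K + 1) (run ++ [d])] else [])) b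
        (by simpa [List.append_assoc] using hdrop') (by simp) rfl
        (by
          intro x hx
          apply hcl
          simp only [List.mem_append, List.mem_cons, List.mem_singleton] at hx ⊢
          tauto)
    rw [hc1] at ih'
    simp only [add_sub_cancel_right] at ih'
    rw [ih']
    refine stA_congr _ _ _ _ _ _ _ _ ?_ ?_ (by simp) ?_
    · exact congrArg (· + 1) (fd_congr w _ _ (by push_cast [List.length_cons]; ring))
    · by_cases h1 : tl' = [] <;> by_cases h2 : rest2 = [] <;>
        · simp [h1, h2, List.append_assoc]
          all_goals
            first
              | rfl
              | (exact pieceB_run_congr w _ _ _ _ _ (by push_cast [List.length_cons]; ring) rfl)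
              | (exact congrArg (fun x => R ++ [x])
                  (pieceB_run_congr w _ _ _ _ _ (by push_cast [List.length_cons]; ring) rfl))
    · exact congrArg (fun x => x - PySem.Int.floordiv ((rstart : Nat) : Int) w)
        (fd_congr w _ _ (by push_cast [List.length_cons]; ring))

-- folding A's step from just after the first character of a run to the end of the text
lemma dropWhile_eq_cons_head_not (p : Char → Bool) :
    ∀ (l : List Char) (c' : Char) (t : List Char), l.dropWhile p = c' :: t → p c' = false := by
  intro l
  induction l with
  | nil => intro c' t h; simp at h
  | cons a l ihl =>
    intro c' t h
    rw [List.dropWhile_cons] at h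
    by_cases ha : p a = true
    · rw [if_pos ha] at h
      exact ihl c' t h
    · rw [if_neg ha] at h
      cases h
      simpa using ha

lemma foldl_init_congr {α β : Type} (f : α → β → α) (l : List β) (i1 i2 : α) (h : i1 = i2) :
    l.foldl f i1 = l.foldl f i2 := by rw [h]

-- folding A's step from just after the first character of a run to the end of the text
lemma contLem (cs : List Char) (w : Int) (hw : 0 < w)
    (hv : ∀ c ∈ cs, pvValid c = true) :
    ∀ (n : Nat) (rest : List Char) (r : Nat) (c : Char) (R : List (List Char)),
      rest.length ≤ n →
      rest ≠ [] →
      List.drop r cs = c :: rest →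
      ((PySem.List.enumerate rest ((r : Int) + 1)).foldl (stepA cs (cs.length : Int) w)
          ⟨PySem.Int.floordiv (r : Int) w + 1, R, [c], 0⟩).result
        = R ++ segsB w (r : Int) (c :: rest) := by
  intro n
  induction n with
  | zero =>
    intro rest r c R hlenle hne hdrop
    exact absurd (List.eq_nil_of_length_eq_zero (Nat.le_zero.mp hlenle)) hne
  | succ n ih =>
    intro rest r c R hlenle hne hdrop
    obtain ⟨tl, htl⟩ :
        ∃ tl, tl = rest.takeWhile (fun d => PySem.Chars.isalpha d == PySem.Chars.isalpha c) :=
      ⟨_, rfl⟩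
    obtain ⟨rest2, hrest2⟩ :
        ∃ r2, r2 = rest.dropWhile (fun d => PySem.Chars.isalpha d == PySem.Chars.isalpha c) :=
      ⟨_, rfl⟩
    have hsplit : tl ++ rest2 = rest := by
      rw [htl, hrest2]; exact List.takeWhile_append_dropWhile
    have htlmem : ∀ x ∈ c :: tl, PySem.Chars.isalpha x = PySem.Chars.isalpha c := by
      intro x hx
      rcases List.mem_cons.mp hx with h | h
      · rw [h]
      · rw [htl] at h
        have := List.mem_takeWhile_imp h
        simpa using this
    have hdrop1 : List.drop r cs = [c] ++ tl ++ rest2 := by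
      rw [hdrop, ← hsplit]; rfl
    have henum : PySem.List.enumerate rest ((r : Int) + 1)
        = PySem.List.enumerate tl ((r : Int) + 1)
          ++ PySem.List.enumerate rest2 (((r : Int) + 1) + (tl.length : Int)) := by
      conv_lhs => rw [← hsplit]
      exact PySem.List.enumerate_append tl rest2 ((r : Int) + 1)
    have hcast1 : (((r + 1 : Nat) : Int)) = (r : Int) + 1 := by push_cast; ring
    have inner := innerLem cs w hw hv tl r (r + 1) [c] rest2 R (PySem.Chars.isalpha c)
        hdrop1 (by simp) (by simp)
        (by intro x hx; exact htlmem x (by simpa using hx))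
    rw [hcast1] at inner
    simp only [add_sub_cancel_right, sub_self] at inner
    rw [henum, List.foldl_append, inner]
    have hS : (((r + 1 + tl.length : Nat) : Int)) = ((r : Int) + 1) + (tl.length : Int) := by
      push_cast; ring
    have hsegs : segsB w (r : Int) (c :: rest)
        = pieceB w (r : Int) ((r + 1 + tl.length : Nat) : Int) (c :: tl)
          :: segsB w ((r + 1 + tl.length : Nat) : Int) rest2 := by
      rw [segsB, ← htl, ← hrest2]
      rw [show (r : Int) + ((c :: tl).length : Int) = ((r + 1 + tl.length : Nat) : Int) from by
        simp [List.length_cons]; omega]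
    rw [hsegs, ← hS]
    have hlen1 := congrArg List.length hdrop1
    simp [List.length_drop] at hlen1
    cases rest2 with
    | nil =>
      have h1 : tl ≠ [] := by
        intro h
        exact hne (by rw [← hsplit, h]; rfl)
      simp only [PySem.List.enumerate_nil, List.foldl_nil]
      simp [h1, segsB]
    | cons c' rest'' =>
      simp only [List.length_cons] at hlen1
      have hdrop2 : List.drop r cs = (c :: tl) ++ c' :: rest'' := by
        rw [hdrop1]; simp
      have hcur := pyGetD_drop cs (c :: tl) rest'' c' r hdrop2
      have hcic : r + (c :: tl).length = r + 1 + tl.length := by simp [List.length_cons]; omega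
      rw [hcic] at hcur
      have hneCT : (c :: tl) ≠ [] := by simp
      have hgl2 : (c :: tl).dropLast ++ (c :: tl).getLast hneCT :: (c' :: rest'')
          = (c :: tl) ++ c' :: rest'' := by
        conv_rhs => rw [← List.dropLast_concat_getLast hneCT]
        simp
      have hdropP2 : List.drop r cs
          = (c :: tl).dropLast ++ (c :: tl).getLast hneCT :: (c' :: rest'') := by
        rw [hdrop2, ← hgl2]
      have hprev := pyGetD_drop cs (c :: tl).dropLast (c' :: rest'') ((c :: tl).getLast hneCT)
          r hdropP2
      have hidx2 : ((r + (c :: tl).dropLast.length : Nat) : Int)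
          = ((r + 1 + tl.length : Nat) : Int) - 1 := by
        rw [List.length_dropLast]
        simp [List.length_cons]
        omega
      rw [hidx2] at hprev
      have hsub2 : ∀ x ∈ (c :: tl) ++ c' :: rest'', x ∈ cs := by
        intro x hx
        rw [← hdrop2] at hx
        exact (List.drop_suffix r cs).subset hx
      have hvc' : pvValid c' = true := hv c' (hsub2 c' (by simp))
      have hvlast2 : pvValid ((c :: tl).getLast hneCT) = true :=
        hv _ (hsub2 _ (List.mem_append_left _ (List.getLast_mem hneCT)))
      have hblast2 : PySem.Chars.isalpha ((c :: tl).getLast hneCT) = PySem.Chars.isalpha c :=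
        htlmem _ (List.getLast_mem hneCT)
      have hc'cls : PySem.Chars.isalpha c' = !(PySem.Chars.isalpha c) := by
        have h := dropWhile_eq_cons_head_not
            (fun d => PySem.Chars.isalpha d == PySem.Chars.isalpha c) rest c' rest'' hrest2.symm
        simp at h
        cases ha : PySem.Chars.isalpha c' <;> cases hb : PySem.Chars.isalpha c <;> simp_all
      have hdiff2 : PySem.Chars.isalpha c' = !(PySem.Chars.isalpha ((c :: tl).getLast hneCT)) := by
        rw [hblast2, hc'cls]
      have hK0 : ((r + 1 + tl.length : Nat) : Int) > 0 := by omega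
      have hKlt : ((r + 1 + tl.length : Nat) : Int) < (cs.length : Int) := by omega
      rw [PySem.List.enumerate_cons, List.foldl_cons,
          stepA_diff cs (cs.length : Int) w _ ((r + 1 + tl.length : Nat) : Int) c'
            ((c :: tl).getLast hneCT) hK0 hKlt hcur hprev hvc' hvlast2 hdiff2]
      dsimp only
      have hfd2 : PySem.Int.floordiv ((r + 1 + tl.length : Nat) : Int) w
          = PySem.Int.floordiv (((r + 1 + tl.length : Nat) : Int) - 1) w
            + (if PySem.Int.mod ((r + 1 + tl.length : Nat) : Int) w = 0 then 1 else 0) := by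
        have h := fd_succ w (((r + 1 + tl.length : Nat) : Int) - 1) hw (by omega)
        simpa using h
      cases rest'' with
      | nil =>
        simp at hlen1
        have hendS : ((r + 1 + tl.length : Nat) : Int) = (cs.length : Int) - 1 := by omega
        rw [if_pos hendS]
        have hsegs2 : segsB w ((r + 1 + tl.length : Nat) : Int) [c']
            = [pieceB w ((r + 1 + tl.length : Nat) : Int)
                 (((r + 1 + tl.length : Nat) : Int) + 1) [c']] := by
          rw [segsB]
          simp [segsB]
        rw [hsegs2]
        simp only [PySem.List.enumerate_nil, List.foldl_nil]
        rw [if_neg (by simp : ¬((c' :: ([] : List Char)) = [] ∧ tl ≠ []))]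
        by_cases hmod : PySem.Int.mod ((r + 1 + tl.length : Nat) : Int) w = 0
        · rw [if_pos hmod] at hfd2 ⊢
          simp only [List.append_nil, pieceB_eq, add_sub_cancel_right, List.append_assoc,
            List.singleton_append, List.cons_append, List.nil_append, List.cons.injEq]
          refine congrArg (fun x => R ++ x) ?_
          refine congrArg₂ (fun x y => (x : List Char) :: [y]) ?_ ?_
          · exact emitPiece_congr _ (by omega) (by omega)
          · exact emitPiece_congr _ (by omega) (by omega)
        · rw [if_neg hmod] at hfd2 ⊢
          simp only [List.append_nil, pieceB_eq, add_sub_cancel_right, List.append_assoc,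
            List.singleton_append, List.cons_append, List.nil_append, List.cons.injEq]
          refine congrArg (fun x => R ++ x) ?_
          refine congrArg₂ (fun x y => (x : List Char) :: [y]) ?_ ?_
          · exact emitPiece_congr _ (by omega) (by omega)
          · exact emitPiece_congr _ (by omega) (by omega)
      | cons c3 rest3 =>
        simp at hlen1
        have hendS : ¬ ((r + 1 + tl.length : Nat) : Int) = (cs.length : Int) - 1 := by omega
        rw [if_neg hendS]
        have hlsplit := congrArg List.length hsplit
        simp at hlsplit
        have hdrop3 : List.drop (r + 1 + tl.length) cs = c' :: c3 :: rest3 := by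
          have h := congrArg (List.drop (c :: tl).length) hdrop2
          rw [List.drop_drop, List.drop_left] at h
          rw [hcic] at h
          exact h
        have ihh := ih (c3 :: rest3) (r + 1 + tl.length) c'
            (R ++ [pieceB w (r : Int) ((r + 1 + tl.length : Nat) : Int) (c :: tl)])
            (by simp; omega) (by simp) hdrop3
        refine Eq.trans
          (congrArg StA.result
            (foldl_init_congr _ _ _ _
              (stA_congr _ _ _ _ _ _ _ _ ?_ ?_ rfl rfl)))
          (ihh.trans (by simp [List.append_assoc]))
        · by_cases hmod : PySem.Int.mod ((r + 1 + tl.length : Nat) : Int) w = 0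
          · rw [if_pos hmod] at hfd2 ⊢
            omega
          · rw [if_neg hmod] at hfd2 ⊢
            omega
        · rw [if_neg (by simp : ¬((c' :: c3 :: rest3 : List Char) = [] ∧ tl ≠ []))]
          rw [List.append_nil, pieceB_eq]
          exact congrArg (fun x => R ++ [x]) (emitPiece_congr _ (by omega) (by omega))

lemma foldA_eq_segsB (cs : List Char) (w : Int) (hw : 0 < w)
    (hv : ∀ c ∈ cs, pvValid c = true) :
    ((PySem.List.enumerate cs 0).foldl (stepA cs (cs.length : Int) w) ⟨1, [], [], 0⟩).result
      = segsB w 0 cs := by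
  cases cs with
  | nil => simp [PySem.List.enumerate_nil, segsB]
  | cons c rest =>
    rw [PySem.List.enumerate_cons, List.foldl_cons]
    have hstep : stepA (c :: rest) (((c :: rest).length : Nat) : Int) w ⟨1, [], [], 0⟩ (0, c)
        = (if rest = [] then
             ⟨1, [[c] ++ '(' :: PySem.Chars.join [',']
                    ((PySem.List.pyRange 1 2 1).map PySem.Int.toChars) ++ [')']], [c], 0⟩
           else ⟨1, [], [c], 0⟩) := by
      unfold stepA
      dsimp only
      by_cases hr : rest = []
      · subst hr
        simp
      · have h0 : 0 < rest.length := by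
          cases rest with
          | nil => exact absurd rfl hr
          | cons a l => simp
        have hne0 : ¬ (0 : Int) = ((rest.length : Nat) : Int) := by omega
        simp [hr, hne0]
    rw [hstep]
    by_cases hr : rest = []
    · subst hr
      rw [if_pos rfl]
      simp only [PySem.List.enumerate_nil, List.foldl_nil]
      rw [segsB]
      simp [segsB, pieceB_eq, emitPiece, fd_zero w hw]
    · rw [if_neg hr]
      have hc := contLem (c :: rest) w hw hv rest.length rest 0 c [] (Nat.le_refl _) hr
        (by simp)
      simp only [Nat.cast_zero, fd_zero w hw, zero_add, List.nil_append] at hc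
      simpa using hc



-- ===== VERDICT (by name: the statement is the Claim_ definition above) =====
theorem process_spec : Claim_equal_process := by
  unfold Claim_equal_process
  intro text width _
  unfold Spec_process
  unfold process process_alt check_params
  dsimp only
  rw [cp_fold]
  by_cases hbad : text.toList.any (fun c => !(PySem.Chars.isalpha c || c == ' ')) = true
  · have hex : ∃ x ∈ text.toList, PySem.Chars.isalpha x = false ∧ ¬x = ' ' := by
      simpa using hbad
    simp [hex]
  · have hv : ∀ c ∈ text.toList, pvValid c = true := by
      intro c hc
      by_contra hcon
      apply hbad
      rw [List.any_eq_true]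
      refine ⟨c, hc, ?_⟩
      simp only [pvValid] at hcon
      simp only [Bool.not_eq_true] at hcon
      simp [hcon]
    have hnex : ¬ ∃ x ∈ text.toList, PySem.Chars.isalpha x = false ∧ ¬x = ' ' := by
      simpa using hbad
    by_cases hwid : (width < 10 || width > 80) = true
    · have hor : width < 10 ∨ 80 < width := by simpa using hwid
      simp [hnex, hor]
    · have hnor : ¬ (width < 10 ∨ 80 < width) := by simpa using hwid
      have hw10 : 0 < width := by omega
      simp [hnex, hnor]
      have hfix : ((text.length : Nat) : Int) = ((text.toList.length : Nat) : Int) := by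
        simp
      rw [hfix, foldA_eq_segsB text.toList width hw10 hv]
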